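-- pv_equiv track=rewrite | github.com/SvenMayer/adventofcode23 | challenges/day13/solution.py | getlreftreflectionpt
-- ===== SOURCE A (Python) =====
-- def getlreftreflectionpt(inp):
--     idx = [i for i in range(len(inp)) if inp[i] == inp[0]]
--     if len(idx) > 1:
--         if len(idx) % 2:
--             idx = idx[:-1]
--     splits = []
--     for dl in idx[1:]:
--         l = dl
--         i = 0
--         while i < l:
--             if inp[i] != inp[l]:
--                 break
--             l -= 1
--             i += 1
--         if l < i:
--             splits.append((dl+1)//2)
--     return splits
-- ===== SOURCE B (Python) =====
-- def getlreftreflectionpt(inp):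
--     idx = [i for i, row in enumerate(inp) if row == inp[0]]
--     if len(idx) > 1 and len(idx) % 2:
--         idx = idx[:-1]
--     return [(dl + 1) // 2 for dl in idx[1:]
--             if dl % 2 and inp[:(dl + 1) // 2] == inp[(dl + 1) // 2:dl + 1][::-1]]
-- ===== Notes on version B (the rewrite author's own statement) =====
-- stated objective: simpler
-- what changed: replaces the mutable two-pointer while-loop palindrome scan (with break and leftover i/l state) by a direct comparison of the first half of the prefix with the reversed second half, and the append-accumulator loop by a single comprehension with an explicit even-length (odd index) test
import Mathlib
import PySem

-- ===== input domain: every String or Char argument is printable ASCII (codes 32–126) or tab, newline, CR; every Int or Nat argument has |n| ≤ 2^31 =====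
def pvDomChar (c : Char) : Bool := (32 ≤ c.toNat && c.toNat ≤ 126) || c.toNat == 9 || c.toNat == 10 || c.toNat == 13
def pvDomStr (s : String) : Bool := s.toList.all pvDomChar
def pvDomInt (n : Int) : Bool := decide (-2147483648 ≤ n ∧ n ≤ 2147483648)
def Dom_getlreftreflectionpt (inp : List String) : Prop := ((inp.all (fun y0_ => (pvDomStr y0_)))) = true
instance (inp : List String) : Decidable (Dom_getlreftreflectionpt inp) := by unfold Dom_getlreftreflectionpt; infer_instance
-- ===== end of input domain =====

-- B replaces A's mutable two-pointer while-loop palindrome scan by comparing the first half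
-- of the prefix with the reversed second half, in a single comprehension (objective: simpler).

-- ===== PORT A =====
-- A's inner while loop: i, l move towards each other; stops on mismatch or crossing.
def pvLoopA (inp : List String) (i l : Int) : Int × Int :=
  if _h : i < l then
    if PySem.List.pyGet? inp i ≠ PySem.List.pyGet? inp l then (i, l)
    else pvLoopA inp (i + 1) (l - 1)
  else (i, l)
termination_by (l - i).toNat
decreasing_by omega

def getlreftreflectionpt (inp : List String) : List Int :=
  let idx0 := (PySem.List.pyRange 0 (inp.length : Int) 1).filter
      (fun i => PySem.List.pyGet? inp i == PySem.List.pyGet? inp 0)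
  let idx := if idx0.length > 1 then
      (if idx0.length % 2 ≠ 0 then PySem.List.slice idx0 none (some (-1)) else idx0)
    else idx0
  (PySem.List.slice idx (some 1) none).foldl (fun splits dl =>
      let r := pvLoopA inp 0 dl
      if r.2 < r.1 then splits ++ [PySem.Int.floordiv (dl + 1) 2] else splits) []

-- ===== PORT B =====
def getlreftreflectionpt_alt (inp : List String) : List Int :=
  let idx0 := ((PySem.List.enumerate inp 0).filter
      (fun p => some p.2 == PySem.List.pyGet? inp 0)).map (fun p => p.1)
  let idx := if idx0.length > 1 && idx0.length % 2 != 0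
    then PySem.List.slice idx0 none (some (-1)) else idx0
  ((PySem.List.slice idx (some 1) none).filter (fun dl =>
      (PySem.Int.mod dl 2 != 0) &&
      -- inp[:(dl+1)//2] == inp[(dl+1)//2 : dl+1][::-1]; [::-1] is List.reverse (PySem.List.slice?_none_none_neg_one)
      (PySem.List.slice inp none (some (PySem.Int.floordiv (dl + 1) 2)) ==
        (PySem.List.slice inp (some (PySem.Int.floordiv (dl + 1) 2)) (some (dl + 1))).reverse))
    ).map (fun dl => PySem.Int.floordiv (dl + 1) 2)

-- ===== PRECONDITION & SPEC =====
def Spec_getlreftreflectionpt (inp : List String) (out : List Int) : Prop := out = getlreftreflectionpt_alt inp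
instance (inp : List String) (out : List Int) : Decidable (Spec_getlreftreflectionpt inp out) := by unfold Spec_getlreftreflectionpt; infer_instance

-- ===== CLAIM (what is proved, stated in full; the proofs are below) =====
def Claim_equal_getlreftreflectionpt : Prop := ∀ (inp : List String), Dom_getlreftreflectionpt inp → Spec_getlreftreflectionpt inp (getlreftreflectionpt inp)

-- ===== LEMMAS AND PROOFS =====

-- A's while loop ends with l < i  ⟺  the gap is odd and the segment [i, l] is symmetric.
lemma pvLoopA_lt_iff (inp : List String) (d : Nat) : ∀ i l : Int, l - i = d →
    ((pvLoopA inp i l).2 < (pvLoopA inp i l).1 ↔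
      (d % 2 = 1 ∧ ∀ j : Int, i ≤ j → j ≤ l →
        PySem.List.pyGet? inp j = PySem.List.pyGet? inp (i + l - j))) := by
  induction d using Nat.strong_induction_on with
  | _ d ih =>
    intro i l hd
    by_cases hil : i < l
    · rw [pvLoopA, dif_pos hil]
      by_cases hne : PySem.List.pyGet? inp i = PySem.List.pyGet? inp l
      · simp only [hne, ne_eq, not_true_eq_false, if_false]
        rcases Nat.lt_or_ge d 2 with hd2 | hd2
        · -- d = 1 : one more unfolding, the loop exits crossed
          have hd1 : d = 1 := by omega
          have hl : l = i + 1 := by omega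
          subst hl
          rw [pvLoopA, dif_neg (show ¬ (i + 1 < i + 1 - 1) by omega)]
          constructor
          · intro _
            refine ⟨by omega, ?_⟩
            intro j hj1 hj2
            by_cases hji : j = i
            · rw [hji, show i + (i + 1) - i = i + 1 by ring]; exact hne
            · have hjl : j = i + 1 := by omega
              rw [hjl, show i + (i + 1) - (i + 1) = i by ring]; exact hne.symm
          · intro _
            show (i + 1 - 1 : Int) < i + 1
            omega
        · -- d ≥ 2 : inductive step on (i+1, l-1)
          have hrec := ih (d - 2) (by omega) (i + 1) (l - 1) (by omega)
          rw [hrec]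
          have hpar : (d - 2) % 2 = 1 ↔ d % 2 = 1 := by omega
          constructor
          · rintro ⟨hp, hall⟩
            refine ⟨hpar.mp hp, ?_⟩
            intro j hj1 hj2
            by_cases hji : j = i
            · rw [hji, show i + l - i = l by ring]; exact hne
            · by_cases hjl : j = l
              · rw [hjl, show i + l - l = i by ring]; exact hne.symm
              · have := hall j (by omega) (by omega)
                rwa [show i + 1 + (l - 1) - j = i + l - j by ring] at this
          · rintro ⟨hp, hall⟩
            refine ⟨hpar.mpr hp, ?_⟩
            intro j hj1 hj2
            have := hall j (by omega) (by omega)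
            rwa [show i + l - j = i + 1 + (l - 1) - j by ring] at this
      · rw [if_pos hne]
        constructor
        · intro h; exact absurd h (by omega)
        · rintro ⟨_, hall⟩
          have := hall i (le_refl i) (by omega)
          rw [show i + l - i = l by ring] at this
          exact absurd this hne
    · rw [pvLoopA, dif_neg hil]
      constructor
      · intro h; exact absurd h (by omega)
      · rintro ⟨hp, _⟩
        exact absurd hp (by omega)

-- the symmetric full-range condition over Int indices ⟺ the half-range condition over Nat indices
lemma full_iff_half (inp : List String) (m : Nat) (_hm : m < inp.length) :
    (∀ j : Int, 0 ≤ j → j ≤ (m : Int) →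
        PySem.List.pyGet? inp j = PySem.List.pyGet? inp (0 + (m : Int) - j)) ↔
      (∀ k : Nat, k < (m + 1) / 2 → inp[k]? = inp[m - k]?) := by
  have hget : ∀ k : Nat, k ≤ m → PySem.List.pyGet? inp (k : Int) = inp[k]? := by
    intro k _; simp
  constructor
  · intro hfull k hk
    have := hfull (k : Int) (by omega) (by omega)
    rw [show (0 : Int) + (m : Int) - (k : Int) = ((m - k : Nat) : Int) by omega] at this
    rw [hget k (by omega), hget (m - k) (by omega)] at this
    exact this
  · intro hhalf j hj0 hjm
    obtain ⟨k, rfl⟩ : ∃ k : Nat, j = (k : Int) := ⟨j.toNat, by omega⟩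
    have hkm : k ≤ m := by omega
    rw [show (0 : Int) + (m : Int) - (k : Int) = ((m - k : Nat) : Int) by omega]
    rw [hget k hkm, hget (m - k) (by omega)]
    have hcase : k < (m + 1) / 2 ∨ m - k < (m + 1) / 2 ∨ k = m - k := by omega
    rcases hcase with h | h | h
    · exact hhalf k h
    · have := hhalf (m - k) h
      rw [show m - (m - k) = k by omega] at this
      exact this.symm
    · rw [← h]

-- B's slice comparison ⟺ the half-range condition (for odd m)
lemma slice_iff_half (inp : List String) (m : Nat) (hm : m < inp.length) (hodd : m % 2 = 1) :
    (inp.take ((m + 1) / 2) = ((inp.drop ((m + 1) / 2)).take ((m + 1) - (m + 1) / 2)).reverse) ↔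
      (∀ k : Nat, k < (m + 1) / 2 → inp[k]? = inp[m - k]?) := by
  set h := (m + 1) / 2 with hh
  have h2 : 2 * h = m + 1 := by omega
  rw [show (m + 1) - h = h by omega]
  have hlen : ((inp.drop h).take h).length = h := by
    simp only [List.length_take, List.length_drop]
    omega
  have hR : ∀ k : Nat, k < h → (((inp.drop h).take h).reverse)[k]? = inp[m - k]? := by
    intro k hk
    rw [List.getElem?_reverse (by rw [hlen]; omega), hlen]
    rw [List.getElem?_take, if_pos (by omega), List.getElem?_drop]
    rw [show h + (h - 1 - k) = m - k by omega]
  have hL : ∀ k : Nat, k < h → (inp.take h)[k]? = inp[k]? := by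
    intro k hk
    rw [List.getElem?_take, if_pos hk]
  constructor
  · intro hEq k hk
    have := congrArg (fun l => l[k]?) hEq
    simp only at this
    rw [hL k hk, hR k hk] at this
    exact this
  · intro hhalf
    apply List.ext_getElem?
    intro k
    by_cases hk : k < h
    · rw [hL k hk, hR k hk]
      exact hhalf k hk
    · rw [List.getElem?_eq_none (by simp only [List.length_take]; omega),
         List.getElem?_eq_none (by rw [List.length_reverse, hlen]; omega)]

-- per-candidate: A's loop-success test coincides with B's filter test
lemma cond_iff (inp : List String) (dl : Int) (h0 : 0 ≤ dl) (hlt : dl < (inp.length : Int)) :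
    (decide ((pvLoopA inp 0 dl).2 < (pvLoopA inp 0 dl).1)) =
      ((PySem.Int.mod dl 2 != 0) &&
       (PySem.List.slice inp none (some (PySem.Int.floordiv (dl + 1) 2)) ==
         (PySem.List.slice inp (some (PySem.Int.floordiv (dl + 1) 2)) (some (dl + 1))).reverse)) := by
  obtain ⟨m, rfl⟩ : ∃ m : Nat, dl = (m : Int) := ⟨dl.toNat, by omega⟩
  have hm : m < inp.length := by omega
  have hfd : PySem.Int.floordiv ((m : Int) + 1) 2 = (((m + 1) / 2 : Nat) : Int) := by
    rw [show (m : Int) + 1 = ((m + 1 : Nat) : Int) by push_cast; ring]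
    exact_mod_cast PySem.Int.floordiv_natCast (m + 1) 2
  rw [hfd, PySem.List.slice_to_natCast,
     show ((m : Int) + 1) = (((m + 1 : Nat)) : Int) by push_cast; ring,
     PySem.List.slice_natCast]
  have hmod : PySem.Int.mod (m : Int) 2 = (((m % 2 : Nat)) : Int) := by
    exact_mod_cast PySem.Int.mod_natCast m 2
  have hloop := pvLoopA_lt_iff inp m 0 (m : Int) (by omega)
  rcases Nat.even_or_odd m with he | ho
  · -- even m: both sides are false
    have e0 : m % 2 = 0 := Nat.even_iff.mp he
    have hfalse : ¬ ((pvLoopA inp 0 (m : Int)).2 < (pvLoopA inp 0 (m : Int)).1) := by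
      rw [hloop]
      rintro ⟨hp, _⟩
      omega
    rw [decide_eq_false hfalse, hmod]
    rw [e0]
    simp
  · have hodd : m % 2 = 1 := Nat.odd_iff.mp ho
    rw [hmod, hodd]
    have h10 : ((((1 : Nat) : Int)) != 0) = true := by decide
    rw [h10, Bool.true_and, Bool.eq_iff_iff, decide_eq_true_iff, beq_iff_eq, hloop,
       full_iff_half inp m hm, ← slice_iff_half inp m hm hodd]
    constructor
    · rintro ⟨_, h⟩; exact h
    · intro h; exact ⟨hodd, h⟩

-- the two idx-building passes produce the same list
lemma idx_eq (inp : List String) :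
    ((PySem.List.enumerate inp 0).filter
        (fun p => some p.2 == PySem.List.pyGet? inp 0)).map (fun p => p.1) =
      (PySem.List.pyRange 0 (inp.length : Int) 1).filter
        (fun i => PySem.List.pyGet? inp i == PySem.List.pyGet? inp 0) := by
  rw [PySem.List.enumerate_eq_map_pyRange inp ""]
  simp only [PySem.List.len_eq]
  rw [List.filter_map, List.map_map]
  have hid : ((fun p : Int × String => p.1) ∘ fun j => (j, PySem.List.pyGetD inp j "")) = id := by
    funext j; rfl
  rw [hid, List.map_id]
  apply List.filter_congr
  intro j hj
  rw [PySem.List.mem_pyRange_one] at hj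
  have h2 : j.toNat < inp.length := by omega
  have hj' : PySem.List.pyGet? inp j = some (PySem.List.pyGetD inp j "") := by
    simp only [PySem.List.pyGetD]
    rw [PySem.List.pyGet?_of_nonneg inp hj.1, List.getElem?_eq_getElem h2]
    rfl
  simp only [Function.comp, hj']

-- ===== VERDICT (by name: the statement is the Claim_ definition above) =====
theorem getlreftreflectionpt_spec : Claim_equal_getlreftreflectionpt := by
  intro inp _
  unfold Spec_getlreftreflectionpt
  show getlreftreflectionpt inp = getlreftreflectionpt_alt inp
  simp only [getlreftreflectionpt, getlreftreflectionpt_alt]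
  rw [idx_eq]
  set idx0 := (PySem.List.pyRange 0 (inp.length : Int) 1).filter
      (fun i => PySem.List.pyGet? inp i == PySem.List.pyGet? inp 0) with hidx0
  have hsame : (if idx0.length > 1 then
        (if idx0.length % 2 ≠ 0 then PySem.List.slice idx0 none (some (-1)) else idx0)
      else idx0) =
      (if idx0.length > 1 && idx0.length % 2 != 0
        then PySem.List.slice idx0 none (some (-1)) else idx0) := by
    rcases Nat.lt_or_ge 1 idx0.length with h1 | h1
    · rcases Nat.even_or_odd idx0.length with he | ho
      · have e0 : idx0.length % 2 = 0 := Nat.even_iff.mp he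
        simp [h1, e0]
      · have e1 : idx0.length % 2 = 1 := Nat.odd_iff.mp ho
        simp [h1, e1]
    · have h1' : ¬ idx0.length > 1 := by omega
      simp [h1']
  rw [hsame]
  set idx := (if idx0.length > 1 && idx0.length % 2 != 0
      then PySem.List.slice idx0 none (some (-1)) else idx0) with hidx
  have hmem : ∀ dl ∈ PySem.List.slice idx (some 1) none,
      0 ≤ dl ∧ dl < (inp.length : Int) := by
    intro dl hdl
    have h1 : dl ∈ idx := PySem.List.mem_of_mem_slice _ _ _ hdl
    have h2 : dl ∈ idx0 := by
      rw [hidx] at h1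
      split at h1
      · exact PySem.List.mem_of_mem_slice _ _ _ h1
      · exact h1
    rw [hidx0, List.mem_filter] at h2
    have := (PySem.List.mem_pyRange_one).mp h2.1
    exact ⟨this.1, this.2⟩
  rw [PySem.List.foldl_append_ite (fun dl => (pvLoopA inp 0 dl).2 < (pvLoopA inp 0 dl).1)
      (fun dl => PySem.Int.floordiv (dl + 1) 2), List.nil_append]
  congr 1
  apply List.filter_congr
  intro dl hdl
  exact cond_iff inp dl (hmem dl hdl).1 (hmem dl hdl).2
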